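-- pv_equiv track=rewrite | github.com/edge-coloring/cycle_detection | parse_prim.py | LabelEdges
-- ===== SOURCE A (Python) =====
-- def LabelEdges(n:int, r: int, G: "list[list[int]]"):
--     edges = set()
--     for i in range(r):
--         edges.add((i, (i + 1) % r))
--         edges.add(((i + 1) % r, i))
--     for i in range(n - r):
--         for j in G[i]:
--             edges.add((i + r, j))
--             edges.add((j, i + r))
--     def is3Cycle(i: int, j: int, k: int):
--         return (i, j) in edges and (j, k) in edges and (k, i) in edges
--     triangles = set()
--     for i in range(n):
--         for j in range(i):
--             for k in range(j):
--                 if is3Cycle(k, j, i):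
--                     triangles.add((k, j, i))
--     triangles = sorted(list(triangles))
--     edgeIndexes = {}
--     def addEdge(x, y):
--         if x > y: x, y = y, x
--         if (x, y) not in edgeIndexes:
--             edgeIndexes[(x, y)] = len(edgeIndexes)
--     for i in range(r):
--         addEdge(i, (i + 1) % r)
--     for a,b,c in triangles:
--         addEdge(a, b)
--         addEdge(b, c)
--         addEdge(c, a)
--     return edgeIndexes
-- ===== SOURCE B (Python) =====
-- def LabelEdges(n: int, r: int, G: "list[list[int]]"):
--     # Canonical undirected edge set, adjacency from it, triangles listed once
--     # per their top edge via neighbourhood intersection, then one dedup pass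
--     # over the canonical edge sequence to assign indexes.
--     und = set()
--     for i in range(r):
--         und.add((min(i, (i + 1) % r), max(i, (i + 1) % r)))
--     for i in range(n - r):
--         for j in G[i]:
--             und.add((min(i + r, j), max(i + r, j)))
--     adj = {}
--     for u, v in und:
--         adj.setdefault(u, set()).add(v)
--         adj.setdefault(v, set()).add(u)
--     tris = []
--     for j, i in und:
--         if 0 <= j and i < n and j < i:
--             for k in adj[i] & adj[j]:
--                 if 0 <= k < j:
--                     tris.append((k, j, i))
--     tris.sort()
--     seq = [(min(i, (i + 1) % r), max(i, (i + 1) % r)) for i in range(r)]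
--     for a, b, c in tris:
--         seq += [(min(a, b), max(a, b)), (min(b, c), max(b, c)), (min(c, a), max(c, a))]
--     out, seen = {}, set()
--     for e in seq:
--         if e not in seen:
--             seen.add(e)
--             out[e] = len(out)
--     return out
-- ===== Notes on version B (the rewrite author's own statement) =====
-- stated objective: faster
-- what changed: Replaces A's O(n^3) scan of all vertex triples by building a canonical undirected edge set and adjacency sets once, listing each triangle exactly once from its top edge by adjacency-set intersection, and assigning edge indexes with a single dedup pass over the canonical edge sequence instead of A's swap-and-check addEdge.
import Mathlib
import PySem

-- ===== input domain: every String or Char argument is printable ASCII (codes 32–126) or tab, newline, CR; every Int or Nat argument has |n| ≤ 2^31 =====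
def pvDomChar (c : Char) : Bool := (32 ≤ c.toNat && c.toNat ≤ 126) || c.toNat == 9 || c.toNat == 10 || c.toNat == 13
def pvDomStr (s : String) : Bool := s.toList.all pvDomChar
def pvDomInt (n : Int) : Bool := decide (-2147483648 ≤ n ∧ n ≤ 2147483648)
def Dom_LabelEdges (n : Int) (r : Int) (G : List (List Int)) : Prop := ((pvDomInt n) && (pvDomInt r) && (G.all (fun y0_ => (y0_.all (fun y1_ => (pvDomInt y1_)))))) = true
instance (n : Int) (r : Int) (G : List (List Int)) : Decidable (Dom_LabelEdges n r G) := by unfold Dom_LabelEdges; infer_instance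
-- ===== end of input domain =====

-- B builds a canonical undirected edge set once, lists each triangle exactly once from its top edge
-- by adjacency-set intersection, and assigns edge indexes in a single dedup pass; equal return value
-- (A returns a dict, both ports emit its items flattened to (x, y, index)).

-- Python tuple order on int triples (the sort key used by both ports' sorting step)
def pvKey3 (t : Int × Int × Int) : Lex (Int × Lex (Int × Int)) := toLex (t.1, toLex (t.2.1, t.2.2))

-- ===== PORT A =====
def pvIs3Cycle (edges : PySem.Set (Int × Int)) (i j k : Int) : Bool :=
  edges.contains (i, j) && edges.contains (j, k) && edges.contains (k, i)

def pvAddEdgeA (d : PySem.Dict (Int × Int) Int) (x y : Int) : PySem.Dict (Int × Int) Int :=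
  let p := if x > y then (y, x) else (x, y)
  if d.contains p then d else d.insert p d.size

def LabelEdges (n : Int) (r : Int) (G : List (List Int)) : List (Int × Int × Int) :=
  let edges : PySem.Set (Int × Int) :=
    (PySem.List.pyRange 0 r 1).foldl
      (fun e i => PySem.Set.add (PySem.Set.add e (i, PySem.Int.mod (i + 1) r)) (PySem.Int.mod (i + 1) r, i)) []
  let edges :=
    (PySem.List.pyRange 0 (n - r) 1).foldl (fun e i =>
      ((PySem.List.pyGet? G i).getD []).foldl (fun e j =>
        PySem.Set.add (PySem.Set.add e (i + r, j)) (j, i + r)) e) edges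
  let triangles : PySem.Set (Int × Int × Int) :=
    (PySem.List.pyRange 0 n 1).foldl (fun t i =>
      (PySem.List.pyRange 0 i 1).foldl (fun t j =>
        (PySem.List.pyRange 0 j 1).foldl (fun t k =>
          if pvIs3Cycle edges k j i then PySem.Set.add t (k, j, i) else t) t) t) []
  let triangles := PySem.List.sorted triangles pvKey3 false
  let d : PySem.Dict (Int × Int) Int :=
    (PySem.List.pyRange 0 r 1).foldl (fun d i => pvAddEdgeA d i (PySem.Int.mod (i + 1) r)) PySem.Dict.empty
  let d := triangles.foldl (fun d t => pvAddEdgeA (pvAddEdgeA (pvAddEdgeA d t.1 t.2.1) t.2.1 t.2.2) t.2.2 t.1) d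
  d.items.map (fun p => (p.1.1, p.1.2, p.2))

-- ===== PORT B =====
-- (min(x,y), max(x,y)) of Source B
def pvCanon (x y : Int) : Int × Int := (min x y, max x y)

def LabelEdges_alt (n : Int) (r : Int) (G : List (List Int)) : List (Int × Int × Int) :=
  let und : PySem.Set (Int × Int) :=
    (PySem.List.pyRange 0 r 1).foldl (fun s i => PySem.Set.add s (pvCanon i (PySem.Int.mod (i + 1) r))) []
  let und :=
    (PySem.List.pyRange 0 (n - r) 1).foldl (fun s i =>
      ((PySem.List.pyGet? G i).getD []).foldl (fun s j => PySem.Set.add s (pvCanon (i + r) j)) s) und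
  -- adj.setdefault(u, set()).add(v) mutates the set stored at u: ported as Dict.modify
  let adj : PySem.Dict Int (PySem.Set Int) :=
    und.foldl (fun d p =>
      (d.modify p.1 [] (fun s => PySem.Set.add s p.2)).modify p.2 [] (fun s => PySem.Set.add s p.1))
      PySem.Dict.empty
  -- adj[i] / adj[j] exist for every (j, i) in und, so getD is exact here
  let tris : List (Int × Int × Int) :=
    und.foldl (fun t p =>
      if 0 ≤ p.1 ∧ p.2 < n ∧ p.1 < p.2 then
        (PySem.Set.inter (adj.getD p.2 []) (adj.getD p.1 [])).foldl (fun t k =>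
          if 0 ≤ k ∧ k < p.1 then t ++ [(k, p.1, p.2)] else t) t
      else t) []
  let tris := PySem.List.sorted tris pvKey3 false
  let seq : List (Int × Int) :=
    tris.foldl (fun acc t => acc ++ [pvCanon t.1 t.2.1, pvCanon t.2.1 t.2.2, pvCanon t.2.2 t.1])
      ((PySem.List.pyRange 0 r 1).map (fun i => pvCanon i (PySem.Int.mod (i + 1) r)))
  let st :=
    seq.foldl (fun (st : PySem.Dict (Int × Int) Int × PySem.Set (Int × Int)) e =>
      if st.2.contains e then st else (st.1.insert e st.1.size, PySem.Set.add st.2 e))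
      (PySem.Dict.empty, [])
  st.1.items.map (fun p => (p.1.1, p.1.2, p.2))

-- ===== PRECONDITION & SPEC =====
-- Pre_ excludes exactly the inputs where Python A raises IndexError (G shorter than n - r rows).
def Pre_LabelEdges (n : Int) (r : Int) (G : List (List Int)) : Prop := n - r ≤ (G.length : Int)
instance (n : Int) (r : Int) (G : List (List Int)) : Decidable (Pre_LabelEdges n r G) := by unfold Pre_LabelEdges; infer_instance
def pvWitness_LabelEdges : Int × Int × List (List Int) := (5, 4, [[0, 2]])

def Spec_LabelEdges (n : Int) (r : Int) (G : List (List Int)) (out : List (Int × Int × Int)) : Prop := out = LabelEdges_alt n r G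
instance (n : Int) (r : Int) (G : List (List Int)) (out : List (Int × Int × Int)) : Decidable (Spec_LabelEdges n r G out) := by unfold Spec_LabelEdges; infer_instance

-- ===== CLAIM (what is proved, stated in full; the proofs are below) =====
def Claim_equal_LabelEdges : Prop := ∀ (n : Int) (r : Int) (G : List (List Int)), Dom_LabelEdges n r G → Pre_LabelEdges n r G → Spec_LabelEdges n r G (LabelEdges n r G)

-- ===== LEMMAS AND PROOFS =====

-- generic: a fold whose each step affects a predicate P by "or Q x"
theorem pv_foldl_iff {σ β : Type} (L : List β) (F : σ → β → σ) (P : σ → Prop) (Q : β → Prop)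
    (hF : ∀ s x, x ∈ L → (P (F s x) ↔ P s ∨ Q x)) (s : σ) :
    P (L.foldl F s) ↔ P s ∨ ∃ x ∈ L, Q x := by
  induction L generalizing s with
  | nil => simp
  | cons a t ih =>
    simp only [List.foldl_cons]
    rw [ih (fun s x hx => hF s x (List.mem_cons_of_mem _ hx)), hF s a (List.mem_cons_self)]
    simp only [List.mem_cons]
    constructor
    · rintro ((h | h) | ⟨x, hx, hq⟩)
      · exact Or.inl h
      · exact Or.inr ⟨a, Or.inl rfl, h⟩
      · exact Or.inr ⟨x, Or.inr hx, hq⟩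
    · rintro (h | ⟨x, (rfl | hx), hq⟩)
      · exact Or.inl (Or.inl h)
      · exact Or.inl (Or.inr hq)
      · exact Or.inr ⟨x, hx, hq⟩

-- generic: a fold every step of which preserves a predicate
theorem pv_foldl_preserve {σ β : Type} (L : List β) (F : σ → β → σ) (P : σ → Prop)
    (hF : ∀ s x, P s → P (F s x)) (s : σ) (h : P s) : P (L.foldl F s) := by
  induction L generalizing s with
  | nil => exact h
  | cons a t ih => exact ih _ (hF s a h)

-- generic: folding over a flatMap folds the chunks
theorem pv_foldl_flatMap {σ α β : Type} (L : List α) (g : α → List β) (F : σ → β → σ) (s : σ) :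
    (L.flatMap g).foldl F s = L.foldl (fun s a => (g a).foldl F s) s := by
  induction L generalizing s with
  | nil => rfl
  | cons a t ih => rw [List.flatMap_cons, List.foldl_append, List.foldl_cons, ih]

-- the symmetric edge relation both ports build
def pvRel (n : Int) (r : Int) (G : List (List Int)) (x y : Int) : Prop :=
  (0 ≤ x ∧ x < r ∧ y = PySem.Int.mod (x + 1) r) ∨
  (0 ≤ y ∧ y < r ∧ x = PySem.Int.mod (y + 1) r) ∨
  (∃ i, 0 ≤ i ∧ i < n - r ∧ x = i + r ∧ y ∈ (PySem.List.pyGet? G i).getD []) ∨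
  (∃ i, 0 ≤ i ∧ i < n - r ∧ y = i + r ∧ x ∈ (PySem.List.pyGet? G i).getD [])

theorem pvRel_symm {n r : Int} {G : List (List Int)} {x y : Int} :
    pvRel n r G x y ↔ pvRel n r G y x := by
  unfold pvRel
  constructor <;> (rintro (h | h | ⟨i, h⟩ | ⟨i, h⟩)) <;>
    first
      | exact Or.inr (Or.inl h)
      | exact Or.inl h
      | exact Or.inr (Or.inr (Or.inr ⟨i, h⟩))
      | exact Or.inr (Or.inr (Or.inl ⟨i, h⟩))

-- named pieces of port A
def pvEdges (n r : Int) (G : List (List Int)) : PySem.Set (Int × Int) :=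
  (PySem.List.pyRange 0 (n - r) 1).foldl (fun e i =>
      ((PySem.List.pyGet? G i).getD []).foldl (fun e j =>
        PySem.Set.add (PySem.Set.add e (i + r, j)) (j, i + r)) e)
    ((PySem.List.pyRange 0 r 1).foldl
      (fun e i => PySem.Set.add (PySem.Set.add e (i, PySem.Int.mod (i + 1) r)) (PySem.Int.mod (i + 1) r, i)) [])

def pvTriA (n r : Int) (G : List (List Int)) : PySem.Set (Int × Int × Int) :=
  (PySem.List.pyRange 0 n 1).foldl (fun t i =>
    (PySem.List.pyRange 0 i 1).foldl (fun t j =>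
      (PySem.List.pyRange 0 j 1).foldl (fun t k =>
        if pvIs3Cycle (pvEdges n r G) k j i then PySem.Set.add t (k, j, i) else t) t) t) []

-- named pieces of port B
def pvUnd (n r : Int) (G : List (List Int)) : PySem.Set (Int × Int) :=
  (PySem.List.pyRange 0 (n - r) 1).foldl (fun s i =>
      ((PySem.List.pyGet? G i).getD []).foldl (fun s j => PySem.Set.add s (pvCanon (i + r) j)) s)
    ((PySem.List.pyRange 0 r 1).foldl (fun s i => PySem.Set.add s (pvCanon i (PySem.Int.mod (i + 1) r))) [])

def pvAdjB (n r : Int) (G : List (List Int)) : PySem.Dict Int (PySem.Set Int) :=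
  (pvUnd n r G).foldl (fun d p =>
      (d.modify p.1 [] (fun s => PySem.Set.add s p.2)).modify p.2 [] (fun s => PySem.Set.add s p.1))
    PySem.Dict.empty

def pvTriB (n r : Int) (G : List (List Int)) : List (Int × Int × Int) :=
  (pvUnd n r G).foldl (fun t p =>
    if 0 ≤ p.1 ∧ p.2 < n ∧ p.1 < p.2 then
      (PySem.Set.inter ((pvAdjB n r G).getD p.2 []) ((pvAdjB n r G).getD p.1 [])).foldl (fun t k =>
        if 0 ≤ k ∧ k < p.1 then t ++ [(k, p.1, p.2)] else t) t
    else t) []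

-- canonical single indexing step, the common form of both finishing loops
def pvStep (d : PySem.Dict (Int × Int) Int) (p : Int × Int) : PySem.Dict (Int × Int) Int :=
  if d.contains p then d else d.insert p d.size

def pvFinishA (r : Int) (tris : List (Int × Int × Int)) : List (Int × Int × Int) :=
  ((tris.foldl (fun d t => pvAddEdgeA (pvAddEdgeA (pvAddEdgeA d t.1 t.2.1) t.2.1 t.2.2) t.2.2 t.1)
      ((PySem.List.pyRange 0 r 1).foldl (fun d i => pvAddEdgeA d i (PySem.Int.mod (i + 1) r)) PySem.Dict.empty)).items).map
    (fun p => (p.1.1, p.1.2, p.2))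

def pvSeqB (r : Int) (tris : List (Int × Int × Int)) : List (Int × Int) :=
  tris.foldl (fun acc t => acc ++ [pvCanon t.1 t.2.1, pvCanon t.2.1 t.2.2, pvCanon t.2.2 t.1])
    ((PySem.List.pyRange 0 r 1).map (fun i => pvCanon i (PySem.Int.mod (i + 1) r)))

def pvFinishB (r : Int) (tris : List (Int × Int × Int)) : List (Int × Int × Int) :=
  (((pvSeqB r tris).foldl (fun (st : PySem.Dict (Int × Int) Int × PySem.Set (Int × Int)) e =>
        if st.2.contains e then st else (st.1.insert e st.1.size, PySem.Set.add st.2 e))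
      (PySem.Dict.empty, [])).1.items).map
    (fun p => (p.1.1, p.1.2, p.2))

theorem LabelEdges_eq_finish (n r : Int) (G : List (List Int)) :
    LabelEdges n r G = pvFinishA r (PySem.List.sorted (pvTriA n r G) pvKey3 false) := rfl

theorem LabelEdges_alt_eq_finish (n r : Int) (G : List (List Int)) :
    LabelEdges_alt n r G = pvFinishB r (PySem.List.sorted (pvTriB n r G) pvKey3 false) := rfl

-- pvCanon as the branch A's addEdge takes
theorem pvCanon_eq_ite (x y : Int) : pvCanon x y = if x > y then (y, x) else (x, y) := by
  unfold pvCanon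
  split_ifs with h
  · rw [min_eq_right (by omega), max_eq_left (by omega)]
  · rw [min_eq_left (by omega), max_eq_right (by omega)]

theorem pvCanon_of_le {x y : Int} (h : x ≤ y) : pvCanon x y = (x, y) := by
  unfold pvCanon; rw [min_eq_left h, max_eq_right h]

theorem pvCanon_of_ge {x y : Int} (h : x ≤ y) : pvCanon y x = (x, y) := by
  unfold pvCanon; rw [min_eq_right h, max_eq_left h]

theorem pvAddEdgeA_eq_step (d : PySem.Dict (Int × Int) Int) (x y : Int) :
    pvAddEdgeA d x y = pvStep d (pvCanon x y) := by
  unfold pvAddEdgeA pvStep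
  rw [pvCanon_eq_ite]

-- membership in A's directed edge set
theorem mem_pvEdges {n r : Int} {G : List (List Int)} {x y : Int} :
    (x, y) ∈ pvEdges n r G ↔ pvRel n r G x y := by
  unfold pvEdges
  refine Iff.trans (pv_foldl_iff _ _ (fun s => (x, y) ∈ s)
      (fun i => ∃ j ∈ (PySem.List.pyGet? G i).getD [], (x, y) = (i + r, j) ∨ (x, y) = (j, i + r)) ?_ _) ?_
  · intro s i _
    exact Iff.trans (pv_foldl_iff _ _ (fun s => (x, y) ∈ s)
      (fun j => (x, y) = (i + r, j) ∨ (x, y) = (j, i + r)) (fun s j _ => by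
        simp [PySem.Set.mem_add]; tauto) s) Iff.rfl
  · refine Iff.trans (or_congr (pv_foldl_iff _ _ (fun s => (x, y) ∈ s)
        (fun i => (x, y) = (i, PySem.Int.mod (i + 1) r) ∨ (x, y) = (PySem.Int.mod (i + 1) r, i)) (fun s i _ => by
          simp [PySem.Set.mem_add]; tauto) _) Iff.rfl) ?_
    simp only [List.not_mem_nil, false_or, PySem.List.mem_pyRange_one, Prod.mk.injEq, pvRel]
    constructor
    · rintro (⟨i, ⟨h0, h1⟩, (⟨rfl, rfl⟩ | ⟨rfl, rfl⟩)⟩ | ⟨i, ⟨h0, h1⟩, j, hj, (⟨rfl, rfl⟩ | ⟨rfl, rfl⟩)⟩)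
      · exact Or.inl ⟨h0, h1, rfl⟩
      · exact Or.inr (Or.inl ⟨h0, h1, rfl⟩)
      · exact Or.inr (Or.inr (Or.inl ⟨i, h0, h1, rfl, hj⟩))
      · exact Or.inr (Or.inr (Or.inr ⟨i, h0, h1, rfl, hj⟩))
    · rintro (⟨h0, h1, rfl⟩ | ⟨h0, h1, rfl⟩ | ⟨i, h0, h1, rfl, hj⟩ | ⟨i, h0, h1, rfl, hj⟩)
      · exact Or.inl ⟨x, ⟨h0, h1⟩, Or.inl ⟨rfl, rfl⟩⟩
      · exact Or.inl ⟨y, ⟨h0, h1⟩, Or.inr ⟨rfl, rfl⟩⟩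
      · exact Or.inr ⟨i, ⟨h0, h1⟩, y, hj, Or.inl ⟨rfl, rfl⟩⟩
      · exact Or.inr ⟨i, ⟨h0, h1⟩, x, hj, Or.inr ⟨rfl, rfl⟩⟩

-- membership in B's canonical edge set
theorem mem_pvUnd {n r : Int} {G : List (List Int)} {p : Int × Int} :
    p ∈ pvUnd n r G ↔ p.1 ≤ p.2 ∧ pvRel n r G p.1 p.2 := by
  obtain ⟨x, y⟩ := p
  unfold pvUnd
  refine Iff.trans (pv_foldl_iff _ _ (fun s => (x, y) ∈ s)
      (fun i => ∃ j ∈ (PySem.List.pyGet? G i).getD [], (x, y) = pvCanon (i + r) j) ?_ _) ?_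
  · intro s i _
    exact Iff.trans (pv_foldl_iff _ _ (fun s => (x, y) ∈ s)
      (fun j => (x, y) = pvCanon (i + r) j) (fun s j _ => by simp [PySem.Set.mem_add]) s) Iff.rfl
  · refine Iff.trans (or_congr (pv_foldl_iff _ _ (fun s => (x, y) ∈ s)
        (fun i => (x, y) = pvCanon i (PySem.Int.mod (i + 1) r)) (fun s i _ => by
          simp [PySem.Set.mem_add]) _) Iff.rfl) ?_
    simp only [List.not_mem_nil, false_or, PySem.List.mem_pyRange_one, pvRel]
    constructor
    · rintro (⟨i, ⟨h0, h1⟩, hc⟩ | ⟨i, ⟨h0, h1⟩, j, hj, hc⟩) <;>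
        rw [pvCanon_eq_ite] at hc
      · by_cases hlt : i > PySem.Int.mod (i + 1) r
        · rw [if_pos hlt] at hc
          obtain ⟨rfl, rfl⟩ := Prod.mk.injEq .. ▸ hc
          exact ⟨by omega, Or.inr (Or.inl ⟨h0, h1, rfl⟩)⟩
        · rw [if_neg hlt] at hc
          obtain ⟨rfl, rfl⟩ := Prod.mk.injEq .. ▸ hc
          exact ⟨by omega, Or.inl ⟨h0, h1, rfl⟩⟩
      · by_cases hlt : i + r > j
        · rw [if_pos hlt] at hc
          obtain ⟨rfl, rfl⟩ := Prod.mk.injEq .. ▸ hc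
          exact ⟨by omega, Or.inr (Or.inr (Or.inr ⟨i, h0, h1, rfl, hj⟩))⟩
        · rw [if_neg hlt] at hc
          obtain ⟨rfl, rfl⟩ := Prod.mk.injEq .. ▸ hc
          exact ⟨by omega, Or.inr (Or.inr (Or.inl ⟨i, h0, h1, rfl, hj⟩))⟩
    · rintro ⟨hxy, (⟨h0, h1, rfl⟩ | ⟨h0, h1, rfl⟩ | ⟨i, h0, h1, rfl, hj⟩ | ⟨i, h0, h1, rfl, hj⟩)⟩
      · exact Or.inl ⟨x, ⟨h0, h1⟩, (pvCanon_of_le hxy).symm⟩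
      · exact Or.inl ⟨y, ⟨h0, h1⟩, (pvCanon_of_ge hxy).symm⟩
      · exact Or.inr ⟨i, ⟨h0, h1⟩, y, hj, (pvCanon_of_le hxy).symm⟩
      · exact Or.inr ⟨i, ⟨h0, h1⟩, x, hj, (pvCanon_of_ge hxy).symm⟩

theorem nodup_pvUnd (n r : Int) (G : List (List Int)) : (pvUnd n r G).Nodup := by
  unfold pvUnd
  refine pv_foldl_preserve _ _ List.Nodup (fun s i h => ?_) _
    (pv_foldl_preserve _ _ List.Nodup (fun s i h => PySem.Set.nodup_add _ _ h) _ List.nodup_nil)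
  exact pv_foldl_preserve _ _ List.Nodup (fun s j h => PySem.Set.nodup_add _ _ h) _ h

-- B's adjacency dict realizes pvRel
theorem mem_pvAdjB {n r : Int} {G : List (List Int)} {x y : Int} :
    y ∈ (pvAdjB n r G).getD x [] ↔ pvRel n r G x y := by
  unfold pvAdjB
  refine Iff.trans (pv_foldl_iff _ _ (fun d : PySem.Dict Int (PySem.Set Int) => y ∈ PySem.Dict.getD d x [])
      (fun p => (x = p.1 ∧ y = p.2) ∨ (x = p.2 ∧ y = p.1)) ?_ _) ?_
  · intro d p _
    simp only [PySem.Dict.getD_modify]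
    split_ifs <;> simp_all [PySem.Set.mem_add]
  · simp only [PySem.Dict.getD_empty, List.not_mem_nil, false_or]
    constructor
    · rintro ⟨p, hp, (⟨rfl, rfl⟩ | ⟨rfl, rfl⟩)⟩
      · exact (mem_pvUnd.1 hp).2
      · exact pvRel_symm.1 (mem_pvUnd.1 hp).2
    · intro h
      by_cases hxy : x ≤ y
      · exact ⟨(x, y), mem_pvUnd.2 ⟨hxy, h⟩, Or.inl ⟨rfl, rfl⟩⟩
      · exact ⟨(y, x), mem_pvUnd.2 ⟨by omega, pvRel_symm.1 h⟩, Or.inr ⟨rfl, rfl⟩⟩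

theorem nodup_pvAdjB (n r : Int) (G : List (List Int)) (x : Int) :
    ((pvAdjB n r G).getD x []).Nodup := by
  unfold pvAdjB
  refine pv_foldl_preserve _ _ (fun d : PySem.Dict Int (PySem.Set Int) => ∀ z, (d.getD z []).Nodup)
    (fun d p h z => ?_) _ (fun z => by simp [PySem.Dict.getD_empty]) x
  simp only [PySem.Dict.getD_modify]
  split_ifs <;>
    first
      | exact PySem.Set.nodup_add _ _ (PySem.Set.nodup_add _ _ (h _))
      | exact PySem.Set.nodup_add _ _ (h _)
      | exact h _

-- the set of triangles both ports enumerate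
def pvTri (n r : Int) (G : List (List Int)) (t : Int × Int × Int) : Prop :=
  ∃ k j i : Int, t = (k, j, i) ∧ 0 ≤ k ∧ k < j ∧ j < i ∧ i < n ∧
    pvRel n r G k j ∧ pvRel n r G j i ∧ pvRel n r G i k

theorem pvIs3Cycle_iff {n r : Int} {G : List (List Int)} {i j k : Int} :
    pvIs3Cycle (pvEdges n r G) i j k = true ↔ pvRel n r G i j ∧ pvRel n r G j k ∧ pvRel n r G k i := by
  unfold pvIs3Cycle
  simp only [Bool.and_eq_true, PySem.Set.contains_iff]
  rw [mem_pvEdges, mem_pvEdges, mem_pvEdges]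
  tauto

theorem mem_pvTriA {n r : Int} {G : List (List Int)} {t : Int × Int × Int} :
    t ∈ pvTriA n r G ↔ pvTri n r G t := by
  unfold pvTriA
  refine Iff.trans (pv_foldl_iff _ _ (fun s => t ∈ s)
      (fun i => ∃ j ∈ PySem.List.pyRange 0 i 1, ∃ k ∈ PySem.List.pyRange 0 j 1,
        pvIs3Cycle (pvEdges n r G) k j i = true ∧ t = (k, j, i)) ?_ _) ?_
  · intro s i _
    refine Iff.trans (pv_foldl_iff _ _ (fun s => t ∈ s)
        (fun j => ∃ k ∈ PySem.List.pyRange 0 j 1,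
          pvIs3Cycle (pvEdges n r G) k j i = true ∧ t = (k, j, i)) ?_ s) Iff.rfl
    intro s j _
    refine Iff.trans (pv_foldl_iff _ _ (fun s => t ∈ s)
        (fun k => pvIs3Cycle (pvEdges n r G) k j i = true ∧ t = (k, j, i)) ?_ s) Iff.rfl
    intro s k _
    split_ifs with hc
    · simp [PySem.Set.mem_add, hc]
    · simp [hc]
  · simp only [List.not_mem_nil, false_or, PySem.List.mem_pyRange_one, pvTri]
    constructor
    · rintro ⟨i, ⟨hi0, hi1⟩, j, ⟨hj0, hj1⟩, k, ⟨hk0, hk1⟩, hc, rfl⟩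
      obtain ⟨r1, r2, r3⟩ := pvIs3Cycle_iff.1 hc
      exact ⟨k, j, i, rfl, hk0, hk1, hj1, hi1, r1, r2, r3⟩
    · rintro ⟨k, j, i, rfl, hk0, hkj, hji, hin, r1, r2, r3⟩
      exact ⟨i, ⟨by omega, hin⟩, j, ⟨by omega, hji⟩, k, ⟨hk0, hkj⟩,
        pvIs3Cycle_iff.2 ⟨r1, r2, r3⟩, rfl⟩

theorem nodup_pvTriA (n r : Int) (G : List (List Int)) : (pvTriA n r G).Nodup := by
  unfold pvTriA
  refine pv_foldl_preserve _ _ List.Nodup (fun s i h => ?_) _ List.nodup_nil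
  refine pv_foldl_preserve _ _ List.Nodup (fun s j h => ?_) _ h
  refine pv_foldl_preserve _ _ List.Nodup (fun s k h => ?_) _ h
  split_ifs
  · exact PySem.Set.nodup_add _ _ h
  · exact h

-- B's triangle list as a flatMap over the canonical edge set
def pvBatch (n r : Int) (G : List (List Int)) (p : Int × Int) : List (Int × Int × Int) :=
  if 0 ≤ p.1 ∧ p.2 < n ∧ p.1 < p.2 then
    ((PySem.Set.inter ((pvAdjB n r G).getD p.2 []) ((pvAdjB n r G).getD p.1 [])).filter
        (fun k => decide (0 ≤ k ∧ k < p.1))).map (fun k => (k, p.1, p.2))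
  else []

theorem pvTriB_eq_flatMap (n r : Int) (G : List (List Int)) :
    pvTriB n r G = (pvUnd n r G).flatMap (pvBatch n r G) := by
  unfold pvTriB
  have hstep : ∀ (t : List (Int × Int × Int)) (p : Int × Int),
      (if 0 ≤ p.1 ∧ p.2 < n ∧ p.1 < p.2 then
        (PySem.Set.inter ((pvAdjB n r G).getD p.2 []) ((pvAdjB n r G).getD p.1 [])).foldl (fun t k =>
          if 0 ≤ k ∧ k < p.1 then t ++ [(k, p.1, p.2)] else t) t
      else t) = t ++ pvBatch n r G p := by
    intro t p
    unfold pvBatch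
    split_ifs with h
    · exact PySem.List.foldl_append_ite _ _ _ _
    · simp
  calc (pvUnd n r G).foldl (fun t p =>
        if 0 ≤ p.1 ∧ p.2 < n ∧ p.1 < p.2 then
          (PySem.Set.inter ((pvAdjB n r G).getD p.2 []) ((pvAdjB n r G).getD p.1 [])).foldl (fun t k =>
            if 0 ≤ k ∧ k < p.1 then t ++ [(k, p.1, p.2)] else t) t
        else t) []
      = (pvUnd n r G).foldl (fun t p => t ++ pvBatch n r G p) [] :=
        PySem.List.foldl_congr_mem _ _ _ _ (fun t p _ => hstep t p)
    _ = [] ++ (pvUnd n r G).flatMap (pvBatch n r G) := PySem.List.foldl_append_eq_flatMap _ _ _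
    _ = (pvUnd n r G).flatMap (pvBatch n r G) := by simp

theorem mem_pvBatch {n r : Int} {G : List (List Int)} {p : Int × Int} {t : Int × Int × Int} :
    t ∈ pvBatch n r G p ↔
      (0 ≤ p.1 ∧ p.2 < n ∧ p.1 < p.2) ∧
      ∃ k, pvRel n r G p.2 k ∧ pvRel n r G p.1 k ∧ (0 ≤ k ∧ k < p.1) ∧ t = (k, p.1, p.2) := by
  unfold pvBatch
  split_ifs with h
  · simp only [List.mem_map, List.mem_filter, PySem.Set.mem_inter, decide_eq_true_eq, h, true_and]
    constructor
    · rintro ⟨k, ⟨⟨h2, h1⟩, hk⟩, rfl⟩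
      exact ⟨k, mem_pvAdjB.1 h2, mem_pvAdjB.1 h1, hk, rfl⟩
    · rintro ⟨k, h2, h1, hk, rfl⟩
      exact ⟨k, ⟨⟨mem_pvAdjB.2 h2, mem_pvAdjB.2 h1⟩, hk⟩, rfl⟩
  · simp [h]

theorem mem_pvTriB {n r : Int} {G : List (List Int)} {t : Int × Int × Int} :
    t ∈ pvTriB n r G ↔ pvTri n r G t := by
  rw [pvTriB_eq_flatMap]
  simp only [List.mem_flatMap]
  constructor
  · rintro ⟨p, hp, hb⟩
    obtain ⟨⟨h0, hn, hlt⟩, k, r2, r1, ⟨hk0, hk1⟩, rfl⟩ := mem_pvBatch.1 hb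
    exact ⟨k, p.1, p.2, rfl, hk0, hk1, hlt, hn,
      pvRel_symm.1 r1, (mem_pvUnd.1 hp).2, r2⟩
  · rintro ⟨k, j, i, rfl, hk0, hkj, hji, hin, r1, r2, r3⟩
    refine ⟨(j, i), mem_pvUnd.2 ⟨by omega, r2⟩, mem_pvBatch.2 ⟨⟨by omega, hin, hji⟩,
      k, r3, pvRel_symm.1 r1, ⟨hk0, hkj⟩, rfl⟩⟩

theorem nodup_pvTriB (n r : Int) (G : List (List Int)) : (pvTriB n r G).Nodup := by
  rw [pvTriB_eq_flatMap]
  rw [List.nodup_flatMap]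
  constructor
  · intro p _
    unfold pvBatch
    split_ifs
    · refine List.Nodup.map (fun a b hab => ?_) (List.Nodup.filter _ ?_)
      · exact (Prod.mk.injEq .. ▸ hab).1
      · exact PySem.Set.nodup_inter _ _ (nodup_pvAdjB n r G _)
    · exact List.nodup_nil
  · refine (nodup_pvUnd n r G).imp ?_
    intro p q hpq t htp htq
    obtain ⟨_, k1, _, _, _, ht1⟩ := mem_pvBatch.1 htp
    obtain ⟨_, k2, _, _, _, ht2⟩ := mem_pvBatch.1 htq
    apply hpq
    rw [ht1] at ht2
    simp only [Prod.mk.injEq] at ht2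
    exact Prod.ext ht2.2.1 ht2.2.2

theorem pvKey3_injective : Function.Injective pvKey3 := by
  intro a b h
  simp only [pvKey3, toLex_inj, Prod.ext_iff] at h
  obtain ⟨h1, h2, h3⟩ := h
  exact Prod.ext h1 (Prod.ext h2 h3)

theorem sorted_tri_eq (n r : Int) (G : List (List Int)) :
    PySem.List.sorted (pvTriA n r G) pvKey3 false = PySem.List.sorted (pvTriB n r G) pvKey3 false := by
  apply PySem.List.sorted_eq_sorted_of_perm _ _ pvKey3 pvKey3_injective
  rw [List.perm_ext_iff_of_nodup (nodup_pvTriA n r G) (nodup_pvTriB n r G)]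
  intro t
  rw [mem_pvTriA, mem_pvTriB]

-- B's dedup pass computes the same dict as folding pvStep over seq
theorem dedup_fst_eq (L : List (Int × Int)) (d : PySem.Dict (Int × Int) Int) (s : PySem.Set (Int × Int))
    (hinv : ∀ e, s.contains e = d.contains e) :
    (L.foldl (fun (st : PySem.Dict (Int × Int) Int × PySem.Set (Int × Int)) e =>
        if st.2.contains e then st else (st.1.insert e st.1.size, PySem.Set.add st.2 e)) (d, s)).1
      = L.foldl pvStep d := by
  induction L generalizing d s with
  | nil => rfl
  | cons e L ih =>
    simp only [List.foldl_cons]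
    by_cases hc : s.contains e = true
    · rw [if_pos hc]
      have : pvStep d e = d := by unfold pvStep; rw [if_pos (by rw [← hinv]; exact hc)]
      rw [this]
      exact ih d s hinv
    · rw [if_neg hc]
      have hd : d.contains e = false := by rw [← hinv]; exact Bool.eq_false_iff.2 hc
      have : pvStep d e = d.insert e d.size := by unfold pvStep; rw [hd]; rfl
      rw [this]
      refine ih _ _ (fun e' => ?_)
      rw [PySem.Dict.contains_insert]
      by_cases he : e' = e
      · subst he
        simp [PySem.Set.mem_add]
      · have : (e' == e) = false := by simp [he]
        rw [this, Bool.false_or, ← hinv]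
        have hes : e ∉ s := by simpa [PySem.Set.contains_eq_listContains] using hc
        simp [PySem.Set.add, hes, PySem.Set.contains_eq_listContains, he]

-- both finishing passes produce the same dict
theorem pvFinishA_eq_pvFinishB (r : Int) (tris : List (Int × Int × Int)) :
    pvFinishA r tris = pvFinishB r tris := by
  unfold pvFinishA pvFinishB
  rw [dedup_fst_eq _ _ _ (fun e => by simp [PySem.Set.contains_eq_listContains, PySem.Dict.contains_empty])]
  unfold pvSeqB
  rw [PySem.List.foldl_append_eq_flatMap
    (fun t : Int × Int × Int => [pvCanon t.1 t.2.1, pvCanon t.2.1 t.2.2, pvCanon t.2.2 t.1])]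
  rw [List.foldl_append, pv_foldl_flatMap, List.foldl_map]
  have h1 : ∀ (d : PySem.Dict (Int × Int) Int),
      (PySem.List.pyRange 0 r 1).foldl (fun d i => pvAddEdgeA d i (PySem.Int.mod (i + 1) r)) d
        = (PySem.List.pyRange 0 r 1).foldl (fun d i => pvStep d (pvCanon i (PySem.Int.mod (i + 1) r))) d := by
    intro d
    exact PySem.List.foldl_congr_mem _ _ _ _ (fun d i _ => pvAddEdgeA_eq_step d i _)
  rw [h1]
  have h2 : ∀ (d0 : PySem.Dict (Int × Int) Int),
      tris.foldl (fun d t => pvAddEdgeA (pvAddEdgeA (pvAddEdgeA d t.1 t.2.1) t.2.1 t.2.2) t.2.2 t.1) d0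
        = tris.foldl (fun d t =>
            ([pvCanon t.1 t.2.1, pvCanon t.2.1 t.2.2, pvCanon t.2.2 t.1] : List (Int × Int)).foldl pvStep d) d0 := by
    intro d0
    refine PySem.List.foldl_congr_mem _ _ _ _ (fun d t _ => ?_)
    simp only [List.foldl_cons, List.foldl_nil]
    rw [pvAddEdgeA_eq_step, pvAddEdgeA_eq_step, pvAddEdgeA_eq_step]
  rw [h2]

-- ===== VERDICT (by name: the statement is the Claim_ definition above) =====
theorem LabelEdges_spec : Claim_equal_LabelEdges := by
  intro n r G _ _
  unfold Spec_LabelEdges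
  rw [LabelEdges_eq_finish, LabelEdges_alt_eq_finish, sorted_tri_eq, pvFinishA_eq_pvFinishB]
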